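-- pv_equiv track=rewrite | github.com/andrewjleung/gtci | 03-fast-slow-pointer/ch03_cycle_in_circular_array.py | has_cycle_from_start
-- ===== SOURCE A (Python) =====
-- def has_cycle_from_start(arr, start):
--     def get_next(index):
--         return (index + arr[index]) % len(arr)
--
--     slow = start
--     fast = start
--
--     while True:
--         slow = get_next(slow)
--         fast = get_next(get_next(fast))
--
--         if slow == fast:
--             break
--
--     is_forward = arr[slow] >= 0
--     slow = get_next(slow)
--     length = 1
--
--     while slow != fast:
--         if (arr[slow] > 0) != is_forward:
--             return False
--
--         slow = get_next(slow)
--         length += 1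
--
--     if length < 2:
--         return False
--
--     return True
-- ===== SOURCE B (Python) =====
-- def has_cycle_from_start(arr, start):
--     n = len(arr)
--     seen = {}
--     path = []
--     i = start
--     step = 0
--     while i not in seen:
--         seen[i] = step
--         path.append(i)
--         i = (i + arr[i]) % n
--         step += 1
--     cycle = path[seen[i]:]
--     if len(cycle) < 2:
--         return False
--     return all(arr[j] > 0 for j in cycle) or all(arr[j] < 0 for j in cycle)
-- ===== Notes on version B (the rewrite author's own statement) =====
-- stated objective: alternative
-- what changed: Replaces Floyd's slow/fast two-pointer meeting plus a second walk around the cycle with a single pointer walk that records each visited index's first-seen step in a dict, cuts the cycle out of the recorded path at the first repeat, and checks its length and sign-uniformity directly.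
import Mathlib
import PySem

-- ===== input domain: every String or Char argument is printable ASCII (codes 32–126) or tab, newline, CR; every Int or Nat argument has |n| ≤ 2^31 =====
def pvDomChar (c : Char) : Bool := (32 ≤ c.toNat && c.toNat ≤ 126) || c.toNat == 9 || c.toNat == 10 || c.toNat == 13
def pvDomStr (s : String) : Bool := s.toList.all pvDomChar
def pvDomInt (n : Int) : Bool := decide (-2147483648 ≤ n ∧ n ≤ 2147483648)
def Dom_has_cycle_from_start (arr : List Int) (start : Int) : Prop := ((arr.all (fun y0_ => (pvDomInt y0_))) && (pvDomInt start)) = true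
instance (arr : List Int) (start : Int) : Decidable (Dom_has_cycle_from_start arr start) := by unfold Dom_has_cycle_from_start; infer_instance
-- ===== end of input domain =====

-- B replaces Floyd's two-pointer meeting with a single walk recording first-seen steps in a dict
-- and checking the extracted cycle directly (alternative algorithm, same asymptotic cost).

-- ===== PORT A =====
-- get_next(index) = (index + arr[index]) % len(arr); the .getD 0 default is unreachable under Pre_
def pvGetNext (arr : List Int) (index : Int) : Int :=
  PySem.Int.mod (index + (PySem.List.pyGet? arr index).getD 0) (arr.length : Int)

-- the `while True` Floyd loop; fuel is a totality guard only (proved sufficient under Pre_)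
def pvFloyd (arr : List Int) : Nat → Int → Int → Option Int
  | 0, _, _ => none
  | fuel+1, slow, fast =>
    let slow' := pvGetNext arr slow
    let fast' := pvGetNext arr (pvGetNext arr fast)
    if slow' = fast' then some slow' else pvFloyd arr fuel slow' fast'

-- the second `while slow != fast` loop with the trailing `length < 2` check; fuel = totality guard
def pvScan (arr : List Int) (fast : Int) (isForward : Bool) : Nat → Int → Nat → Bool
  | 0, _, _ => false
  | fuel+1, slow, length =>
    if slow = fast then decide (2 ≤ length)
    else if (decide (0 < (PySem.List.pyGet? arr slow).getD 0)) ≠ isForward then false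
    else pvScan arr fast isForward fuel (pvGetNext arr slow) (length + 1)

def has_cycle_from_start (arr : List Int) (start : Int) : Bool :=
  match pvFloyd arr (2 * arr.length + 2) start start with
  | none => false
  | some slow =>
    let isForward := decide (0 ≤ (PySem.List.pyGet? arr slow).getD 0)
    pvScan arr slow isForward (arr.length + 1) (pvGetNext arr slow) 1

-- ===== PORT B =====
-- B's `while i not in seen` walk: seen dict (index ↦ first-seen step), path list, pointer, step;
-- fuel is a totality guard only (proved sufficient under Pre_)
def pvWalk (arr : List Int) : Nat → PySem.Dict Int Int → List Int → Int → Int → Option (PySem.Dict Int Int × List Int × Int)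
  | 0, _, _, _, _ => none
  | fuel+1, seen, path, i, step =>
    match seen.get? i with
    | some _ => some (seen, path, i)
    | none => pvWalk arr fuel (seen.insert i step) (path ++ [i])
        (PySem.Int.mod (i + (PySem.List.pyGet? arr i).getD 0) (arr.length : Int)) (step + 1)

def has_cycle_from_start_alt (arr : List Int) (start : Int) : Bool :=
  match pvWalk arr (arr.length + 2) PySem.Dict.empty [] start 0 with
  | none => false
  | some (seen, path, i) =>
    let cycle := PySem.List.slice path (some ((seen.get? i).getD 0)) none
    if cycle.length < 2 then false
    else cycle.all (fun j => decide (0 < (PySem.List.pyGet? arr j).getD 0))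
      || cycle.all (fun j => decide ((PySem.List.pyGet? arr j).getD 0 < 0))

-- ===== PRECONDITION & SPEC =====
-- Pre_ excludes exactly the inputs on which the Python A raises IndexError: the empty list and
-- an out-of-range start index (B raises there too).
def Pre_has_cycle_from_start (arr : List Int) (start : Int) : Prop :=
  arr ≠ [] ∧ PySem.Raise.InRange arr.length start
instance (arr : List Int) (start : Int) : Decidable (Pre_has_cycle_from_start arr start) := by
  unfold Pre_has_cycle_from_start; infer_instance

def pvWitness_has_cycle_from_start : List Int × Int := ([1, 1], 0)

def Spec_has_cycle_from_start (arr : List Int) (start : Int) (out : Bool) : Prop := out = has_cycle_from_start_alt arr start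
instance (arr : List Int) (start : Int) (out : Bool) : Decidable (Spec_has_cycle_from_start arr start out) := by unfold Spec_has_cycle_from_start; infer_instance

-- ===== CLAIM (what is proved, stated in full; the proofs are below) =====
def Claim_equal_has_cycle_from_start : Prop := ∀ (arr : List Int) (start : Int), Dom_has_cycle_from_start arr start → Pre_has_cycle_from_start arr start → Spec_has_cycle_from_start arr start (has_cycle_from_start arr start)

-- ===== LEMMAS AND PROOFS =====

-- the orbit of the step map from start: pvOrbit arr s k = get_next^k(s)
def pvOrbit (arr : List Int) (s : Int) : Nat → Int
  | 0 => s
  | k+1 => pvGetNext arr (pvOrbit arr s k)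

-- the eventual cycle of the orbit: preperiod mu, minimal period lam
structure PvCycleData (arr : List Int) (s : Int) : Type where
  mu : Nat
  lam : Nat
  lam_pos : 1 ≤ lam
  bound : mu + lam ≤ arr.length + 1
  per : ∀ k, mu ≤ k → pvOrbit arr s (k + lam) = pvOrbit arr s k
  inj : ∀ a b, a < b → b < mu + lam → pvOrbit arr s a ≠ pvOrbit arr s b
  entry : ∀ a q, 1 ≤ q → pvOrbit arr s (a + q) = pvOrbit arr s a → mu ≤ a

theorem pvGetNext_range (arr : List Int) (h : arr ≠ []) (i : Int) :
    0 ≤ pvGetNext arr i ∧ pvGetNext arr i < (arr.length : Int) := by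
  have hn : 0 < (arr.length : Int) := by
    have : arr.length ≠ 0 := fun h0 => h (List.eq_nil_of_length_eq_zero h0)
    omega
  exact ⟨PySem.Int.mod_nonneg _ hn, PySem.Int.mod_lt _ hn⟩

theorem pvOrbit_range (arr : List Int) (s : Int) (h : arr ≠ []) (k : Nat) (hk : 1 ≤ k) :
    0 ≤ pvOrbit arr s k ∧ pvOrbit arr s k < (arr.length : Int) := by
  obtain ⟨d, rfl⟩ := Nat.exists_eq_add_of_le hk
  rw [Nat.add_comm]
  exact pvGetNext_range arr h _

theorem pvPeriodic_iter (arr : List Int) (s : Int) (a q : Nat)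
    (h : ∀ k, a ≤ k → pvOrbit arr s (k + q) = pvOrbit arr s k) :
    ∀ c k, a ≤ k → pvOrbit arr s (k + c * q) = pvOrbit arr s k := by
  intro c
  induction c with
  | zero => intro k hk; simp
  | succ c ih =>
    intro k hk
    have e : k + (c + 1) * q = (k + q) + c * q := by ring
    rw [e, ih (k + q) (by omega), h k hk]

theorem pvPeriodic_propagate (arr : List Int) (s : Int) (a q : Nat)
    (h : pvOrbit arr s (a + q) = pvOrbit arr s a) :
    ∀ k, a ≤ k → pvOrbit arr s (k + q) = pvOrbit arr s k := by
  have key : ∀ d, pvOrbit arr s (a + d + q) = pvOrbit arr s (a + d) := by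
    intro d
    induction d with
    | zero => simpa using h
    | succ d ih =>
      have e : a + (d + 1) + q = (a + d + q) + 1 := by ring
      rw [e]
      show pvGetNext arr (pvOrbit arr s (a + d + q)) = _
      rw [ih]
      rfl
  intro k hk
  obtain ⟨d, rfl⟩ := Nat.exists_eq_add_of_le hk
  exact key d

theorem pvPigeonhole (arr : List Int) (s : Int) (h : arr ≠ []) :
    ∃ a b, 1 ≤ a ∧ a < b ∧ b ≤ arr.length + 1 ∧ pvOrbit arr s a = pvOrbit arr s b := by
  have hn : 0 < arr.length := List.length_pos_of_ne_nil h
  have hmaps : ∀ k ∈ Finset.Icc 1 (arr.length + 1),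
      pvOrbit arr s k ∈ Finset.Ico (0 : Int) (arr.length : Int) := by
    intro k hk
    rw [Finset.mem_Icc] at hk
    obtain ⟨h1, h2⟩ := pvOrbit_range arr s h k hk.1
    rw [Finset.mem_Ico]
    exact ⟨h1, h2⟩
  have hcard : (Finset.Ico (0 : Int) (arr.length : Int)).card < (Finset.Icc 1 (arr.length + 1)).card := by
    rw [Int.card_Ico, Nat.card_Icc]
    simp
  obtain ⟨x, hx, y, hy, hxy, heq⟩ :=
    Finset.exists_ne_map_eq_of_card_lt_of_maps_to hcard hmaps
  rw [Finset.mem_Icc] at hx hy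
  rcases Nat.lt_or_ge x y with hlt | hge
  · exact ⟨x, y, hx.1, hlt, hy.2, heq⟩
  · have hlt : y < x := by omega
    exact ⟨y, x, hy.1, hlt, hx.2, heq.symm⟩

theorem pvMaster (arr : List Int) (s : Int) (h : arr ≠ []) : Nonempty (PvCycleData arr s) := by
  obtain ⟨a0, b0, ha0, hab, hb0, heq0⟩ := pvPigeonhole arr s h
  have hp : 1 ≤ b0 - a0 := by omega
  have hper0 : pvOrbit arr s (a0 + (b0 - a0)) = pvOrbit arr s a0 := by
    have e : a0 + (b0 - a0) = b0 := by omega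
    rw [e]; exact heq0.symm
  have hex : ∃ k, pvOrbit arr s (k + (b0 - a0)) = pvOrbit arr s k := ⟨a0, hper0⟩
  have hmu_spec := Nat.find_spec hex
  have hmu_le : Nat.find hex ≤ a0 := Nat.find_min' hex hper0
  have hperp : ∀ k, Nat.find hex ≤ k →
      pvOrbit arr s (k + (b0 - a0)) = pvOrbit arr s k :=
    pvPeriodic_propagate arr s _ _ hmu_spec
  have hex2 : ∃ l, 1 ≤ l ∧ pvOrbit arr s (Nat.find hex + l) = pvOrbit arr s (Nat.find hex) :=
    ⟨b0 - a0, hp, hmu_spec⟩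
  obtain ⟨hlam1, hlam_spec⟩ := Nat.find_spec hex2
  have hlam_le : Nat.find hex2 ≤ b0 - a0 := Nat.find_min' hex2 ⟨hp, hmu_spec⟩
  have hperl : ∀ k, Nat.find hex ≤ k →
      pvOrbit arr s (k + Nat.find hex2) = pvOrbit arr s k :=
    pvPeriodic_propagate arr s _ _ hlam_spec
  have hiterl := pvPeriodic_iter arr s _ _ hperl
  have hentry : ∀ a q, 1 ≤ q → pvOrbit arr s (a + q) = pvOrbit arr s a → Nat.find hex ≤ a := by
    intro a q hq hper
    have hq' := pvPeriodic_propagate arr s a q hper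
    have hiter := pvPeriodic_iter arr s a q hq'
    have hmq : Nat.find hex ≤ Nat.find hex * q := Nat.le_mul_of_pos_right _ hq
    have key : pvOrbit arr s (a + (b0 - a0)) = pvOrbit arr s a := by
      have h1 := hiter (Nat.find hex) (a + (b0 - a0)) (by omega)
      have e : a + (b0 - a0) + Nat.find hex * q = a + Nat.find hex * q + (b0 - a0) := by ring
      rw [e] at h1
      have h2 := hperp (a + Nat.find hex * q) (by omega)
      have h3 := hiter (Nat.find hex) a le_rfl
      rw [← h1, h2, h3]
    exact Nat.find_min' hex key
  have hinj : ∀ a b, a < b → b < Nat.find hex + Nat.find hex2 →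
      pvOrbit arr s a ≠ pvOrbit arr s b := by
    intro a b hab2 hb heqab
    have ha' : Nat.find hex ≤ a := by
      apply hentry a (b - a) (by omega)
      have e : a + (b - a) = b := by omega
      rw [e]; exact heqab.symm
    have hq' := pvPeriodic_propagate arr s a (b - a) (by
      have e : a + (b - a) = b := by omega
      rw [e]; exact heqab.symm)
    have hal : a ≤ Nat.find hex + a * Nat.find hex2 :=
      le_add_of_le_right (Nat.le_mul_of_pos_right _ hlam1)
    have key : pvOrbit arr s (Nat.find hex + (b - a)) = pvOrbit arr s (Nat.find hex) := by
      have h1 := hiterl a (Nat.find hex + (b - a)) (by omega)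
      have e : Nat.find hex + (b - a) + a * Nat.find hex2
          = Nat.find hex + a * Nat.find hex2 + (b - a) := by ring
      rw [e] at h1
      have h2 := hq' (Nat.find hex + a * Nat.find hex2) hal
      have h3 := hiterl a (Nat.find hex) le_rfl
      rw [← h1, h2, h3]
    have := Nat.find_min hex2 (show b - a < Nat.find hex2 by omega)
    exact this ⟨by omega, key⟩
  exact ⟨⟨Nat.find hex, Nat.find hex2, hlam1, by omega, hperl, hinj, hentry⟩⟩

theorem pvNoRevisit (arr : List Int) (s : Int) (C : PvCycleData arr s) (k i : Nat)
    (_hk : C.mu ≤ k) (hi1 : 1 ≤ i) (hi2 : i < C.lam) :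
    pvOrbit arr s (k + i) ≠ pvOrbit arr s k := by
  intro heq
  have hq' := pvPeriodic_propagate arr s k i heq
  have hiterl := pvPeriodic_iter arr s C.mu C.lam C.per
  have hkl : k ≤ C.mu + k * C.lam :=
    le_add_of_le_right (Nat.le_mul_of_pos_right _ C.lam_pos)
  have key : pvOrbit arr s (C.mu + i) = pvOrbit arr s C.mu := by
    have h1 := hiterl k (C.mu + i) (by omega)
    have e : C.mu + i + k * C.lam = C.mu + k * C.lam + i := by ring
    rw [e] at h1
    have h2 := hq' (C.mu + k * C.lam) hkl
    have h3 := hiterl k C.mu le_rfl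
    rw [← h1, h2, h3]
  exact C.inj C.mu (C.mu + i) (by omega) (by omega) key.symm

theorem pvOrbit_mod (arr : List Int) (s : Int) (C : PvCycleData arr s) (k : Nat) (hk : C.mu ≤ k) :
    pvOrbit arr s k = pvOrbit arr s (C.mu + (k - C.mu) % C.lam) := by
  obtain ⟨d, rfl⟩ := Nat.exists_eq_add_of_le hk
  have hiterl := pvPeriodic_iter arr s C.mu C.lam C.per
  have hdm := Nat.div_add_mod d C.lam
  have h1 := hiterl (d / C.lam) (C.mu + d % C.lam) (by omega)
  have e : C.mu + d % C.lam + d / C.lam * C.lam = C.mu + d := by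
    rw [Nat.mul_comm]; omega
  rw [e] at h1
  have e2 : C.mu + d - C.mu = d := by omega
  rw [e2, h1]

theorem pvFloyd_exists (arr : List Int) (s : Int) (C : PvCycleData arr s) :
    ∃ t, 1 ≤ t ∧ t ≤ arr.length + 1 ∧ pvOrbit arr s t = pvOrbit arr s (2 * t) := by
  have hlam := C.lam_pos
  have hdm := Nat.div_add_mod (max C.mu 1 + C.lam - 1) C.lam
  have hml := Nat.mod_lt (max C.mu 1 + C.lam - 1) (show 0 < C.lam by omega)
  set q0 := (max C.mu 1 + C.lam - 1) / C.lam with hq0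
  have ht1 : max C.mu 1 ≤ C.lam * q0 := by omega
  have ht2 : C.lam * q0 ≤ max C.mu 1 + C.lam - 1 := by omega
  refine ⟨C.lam * q0, by omega, by have := C.bound; omega, ?_⟩
  have hiterl := pvPeriodic_iter arr s C.mu C.lam C.per
  have h1 := hiterl q0 (C.lam * q0) (by omega)
  have e : C.lam * q0 + q0 * C.lam = 2 * (C.lam * q0) := by ring
  rw [e] at h1
  exact h1.symm

theorem pvFloyd_run (arr : List Int) (s : Int) (T : Nat)
    (hT : pvOrbit arr s T = pvOrbit arr s (2 * T))
    (hmin : ∀ j, 1 ≤ j → j < T → pvOrbit arr s j ≠ pvOrbit arr s (2 * j)) :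
    ∀ fuel k, k < T → T ≤ k + fuel →
      pvFloyd arr fuel (pvOrbit arr s k) (pvOrbit arr s (2 * k)) = some (pvOrbit arr s T) := by
  intro fuel
  induction fuel with
  | zero => intro k h1 h2; omega
  | succ fuel ih =>
    intro k h1 h2
    show (if pvGetNext arr (pvOrbit arr s k)
        = pvGetNext arr (pvGetNext arr (pvOrbit arr s (2 * k)))
      then some (pvGetNext arr (pvOrbit arr s k))
      else pvFloyd arr fuel (pvGetNext arr (pvOrbit arr s k))
        (pvGetNext arr (pvGetNext arr (pvOrbit arr s (2 * k))))) = some (pvOrbit arr s T)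
    have es : pvGetNext arr (pvOrbit arr s k) = pvOrbit arr s (k + 1) := rfl
    have ef : pvGetNext arr (pvGetNext arr (pvOrbit arr s (2 * k)))
        = pvOrbit arr s (2 * (k + 1)) := by
      have e : 2 * (k + 1) = 2 * k + 1 + 1 := by ring
      rw [e]; rfl
    rw [es, ef]
    by_cases hk1 : k + 1 = T
    · subst hk1
      rw [if_pos hT]
    · rw [if_neg (hmin (k + 1) (by omega) (by omega))]
      exact ih (k + 1) (by omega) (by omega)

theorem pvScan_run (arr : List Int) (s : Int) (C : PvCycleData arr s) (T : Nat) (hT : C.mu ≤ T)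
    (isF : Bool) :
    ∀ fuel i, 1 ≤ i → i ≤ C.lam → C.lam - i < fuel →
      pvScan arr (pvOrbit arr s T) isF fuel (pvOrbit arr s (T + i)) i =
        (decide (2 ≤ C.lam) &&
          decide (∀ j, j < C.lam → i ≤ j →
            (decide (0 < (PySem.List.pyGet? arr (pvOrbit arr s (T + j))).getD 0) = isF))) := by
  intro fuel
  induction fuel with
  | zero => intro i h1 h2 h3; omega
  | succ fuel ih =>
    intro i h1 h2 h3
    show (if pvOrbit arr s (T + i) = pvOrbit arr s T then decide (2 ≤ i)
      else if (decide (0 < (PySem.List.pyGet? arr (pvOrbit arr s (T + i))).getD 0)) ≠ isF then false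
      else pvScan arr (pvOrbit arr s T) isF fuel (pvGetNext arr (pvOrbit arr s (T + i))) (i + 1)) = _
    by_cases hi : i = C.lam
    · subst hi
      rw [if_pos (C.per T hT)]
      have hv : decide (∀ j, j < C.lam → C.lam ≤ j →
          (decide (0 < (PySem.List.pyGet? arr (pvOrbit arr s (T + j))).getD 0) = isF)) = true := by
        simp only [decide_eq_true_eq]
        intro j hj1 hj2; omega
      rw [hv, Bool.and_true]
    · have hne : pvOrbit arr s (T + i) ≠ pvOrbit arr s T :=
        pvNoRevisit arr s C T i hT h1 (by omega)
      rw [if_neg hne]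
      by_cases hb : (decide (0 < (PySem.List.pyGet? arr (pvOrbit arr s (T + i))).getD 0)) = isF
      · rw [if_neg (by simp [hb])]
        have hrec : pvGetNext arr (pvOrbit arr s (T + i)) = pvOrbit arr s (T + (i + 1)) := rfl
        rw [hrec, ih (i + 1) (by omega) (by omega) (by omega)]
        congr 1
        apply decide_eq_decide.mpr
        constructor
        · intro hall j hj2 hj1
          rcases Nat.eq_or_lt_of_le hj1 with hji | hji
          · rw [← hji]; exact hb
          · exact hall j hj2 hji
        · intro hall j hj2 hj1
          exact hall j hj2 (by omega)
      · rw [if_pos (by simp [hb])]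
        have hv : decide (∀ j, j < C.lam → i ≤ j →
            (decide (0 < (PySem.List.pyGet? arr (pvOrbit arr s (T + j))).getD 0) = isF)) = false := by
          simp only [decide_eq_false_iff_not]
          intro hall
          exact hb (hall i (by omega) le_rfl)
        rw [hv, Bool.and_false]

-- B's seen dict and path after j iterations of the walk
def pvSeenUpTo (arr : List Int) (s : Int) (j : Nat) : PySem.Dict Int Int :=
  (List.range j).foldl (fun d k => d.insert (pvOrbit arr s k) (k : Int)) PySem.Dict.empty

def pvPathUpTo (arr : List Int) (s : Int) (j : Nat) : List Int :=
  (List.range j).map (pvOrbit arr s)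

theorem pvSeen_succ (arr : List Int) (s : Int) (j : Nat) :
    pvSeenUpTo arr s (j + 1) = (pvSeenUpTo arr s j).insert (pvOrbit arr s j) (j : Int) := by
  unfold pvSeenUpTo
  rw [List.range_succ, List.foldl_append]
  rfl

theorem pvSeen_get_none (arr : List Int) (s : Int) (j : Nat) (v : Int)
    (h : ∀ k, k < j → pvOrbit arr s k ≠ v) : (pvSeenUpTo arr s j).get? v = none := by
  induction j with
  | zero => exact PySem.Dict.get?_empty v
  | succ j ih =>
    rw [pvSeen_succ, PySem.Dict.get?_insert]
    rw [if_neg (fun hv => h j (by omega) hv.symm)]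
    exact ih (fun k hk => h k (by omega))

theorem pvSeen_get_some (arr : List Int) (s : Int) (C : PvCycleData arr s) (j k : Nat)
    (hk : k < j) (hj : j ≤ C.mu + C.lam) :
    (pvSeenUpTo arr s j).get? (pvOrbit arr s k) = some (k : Int) := by
  induction j with
  | zero => omega
  | succ j ih =>
    rw [pvSeen_succ, PySem.Dict.get?_insert]
    by_cases hkj : k = j
    · subst hkj; rw [if_pos rfl]
    · rw [if_neg (fun hv => C.inj k j (by omega) (by omega) hv)]
      exact ih (by omega) (by omega)

theorem pvWalk_run (arr : List Int) (s : Int) (C : PvCycleData arr s) :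
    ∀ fuel j, j ≤ C.mu + C.lam → C.mu + C.lam - j < fuel →
      pvWalk arr fuel (pvSeenUpTo arr s j) (pvPathUpTo arr s j) (pvOrbit arr s j) (j : Int) =
        some (pvSeenUpTo arr s (C.mu + C.lam), pvPathUpTo arr s (C.mu + C.lam),
          pvOrbit arr s (C.mu + C.lam)) := by
  intro fuel
  induction fuel with
  | zero => intro j h1 h2; omega
  | succ fuel ih =>
    intro j h1 h2
    by_cases hj : j = C.mu + C.lam
    · subst hj
      have hrep : pvOrbit arr s (C.mu + C.lam) = pvOrbit arr s C.mu := C.per C.mu le_rfl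
      have hget : (pvSeenUpTo arr s (C.mu + C.lam)).get? (pvOrbit arr s (C.mu + C.lam))
          = some (C.mu : Int) := by
        rw [hrep]
        exact pvSeen_get_some arr s C (C.mu + C.lam) C.mu (by have := C.lam_pos; omega) le_rfl
      show (match (pvSeenUpTo arr s (C.mu + C.lam)).get? (pvOrbit arr s (C.mu + C.lam)) with
        | some _ => some (pvSeenUpTo arr s (C.mu + C.lam), pvPathUpTo arr s (C.mu + C.lam),
            pvOrbit arr s (C.mu + C.lam))
        | none => pvWalk arr fuel
            ((pvSeenUpTo arr s (C.mu + C.lam)).insert (pvOrbit arr s (C.mu + C.lam)) ((C.mu + C.lam : Nat) : Int))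
            (pvPathUpTo arr s (C.mu + C.lam) ++ [pvOrbit arr s (C.mu + C.lam)])
            (PySem.Int.mod (pvOrbit arr s (C.mu + C.lam)
              + (PySem.List.pyGet? arr (pvOrbit arr s (C.mu + C.lam))).getD 0) (arr.length : Int))
            (((C.mu + C.lam : Nat) : Int) + 1)) = _
      rw [hget]
    · have hjlt : j < C.mu + C.lam := by omega
      have hget : (pvSeenUpTo arr s j).get? (pvOrbit arr s j) = none :=
        pvSeen_get_none arr s j _ (fun k hk => C.inj k j hk hjlt)
      show (match (pvSeenUpTo arr s j).get? (pvOrbit arr s j) with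
        | some _ => some (pvSeenUpTo arr s j, pvPathUpTo arr s j, pvOrbit arr s j)
        | none => pvWalk arr fuel
            ((pvSeenUpTo arr s j).insert (pvOrbit arr s j) ((j : Nat) : Int))
            (pvPathUpTo arr s j ++ [pvOrbit arr s j])
            (PySem.Int.mod (pvOrbit arr s j
              + (PySem.List.pyGet? arr (pvOrbit arr s j)).getD 0) (arr.length : Int))
            (((j : Nat) : Int) + 1)) = _
      rw [hget]
      have hseen : (pvSeenUpTo arr s j).insert (pvOrbit arr s j) ((j : Nat) : Int)
          = pvSeenUpTo arr s (j + 1) := (pvSeen_succ arr s j).symm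
      have hpath : pvPathUpTo arr s j ++ [pvOrbit arr s j] = pvPathUpTo arr s (j + 1) := by
        unfold pvPathUpTo
        rw [List.range_succ, List.map_append]
        rfl
      have hnext : PySem.Int.mod (pvOrbit arr s j
          + (PySem.List.pyGet? arr (pvOrbit arr s j)).getD 0) (arr.length : Int)
          = pvOrbit arr s (j + 1) := rfl
      have hstep : ((j : Nat) : Int) + 1 = (((j + 1 : Nat)) : Int) := by push_cast; ring
      rw [hseen, hpath, hnext, hstep]
      exact ih (j + 1) (by omega) (by omega)

theorem pvCycleNonzero (arr : List Int) (s : Int) (h : arr ≠ []) (C : PvCycleData arr s)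
    (hlam : 2 ≤ C.lam) (k : Nat) (hk : C.mu ≤ k) :
    (PySem.List.pyGet? arr (pvOrbit arr s k)).getD 0 ≠ 0 := by
  intro h0
  have hn : 0 < arr.length := List.length_pos_of_ne_nil h
  have hv : 0 ≤ pvOrbit arr s k ∧ pvOrbit arr s k < (arr.length : Int) := by
    rcases Nat.eq_zero_or_pos k with hk0 | hk1
    · subst hk0
      have hrep : pvOrbit arr s (0 + C.lam) = pvOrbit arr s 0 := C.per 0 hk
      rw [← hrep]
      exact pvOrbit_range arr s h (0 + C.lam) (by have := C.lam_pos; omega)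
    · exact pvOrbit_range arr s h k hk1
  have hstep : pvOrbit arr s (k + 1) = pvOrbit arr s k := by
    show pvGetNext arr (pvOrbit arr s k) = _
    unfold pvGetNext
    rw [h0, add_zero, PySem.Int.mod_eq_emod_of_pos (by exact_mod_cast hn)]
    exact Int.emod_eq_of_lt hv.1 hv.2
  exact pvNoRevisit arr s C k 1 hk le_rfl (by omega) hstep

theorem pvCycleAll (arr : List Int) (s : Int) (C : PvCycleData arr s) (T : Nat)
    (hT : C.mu ≤ T) (P : Int → Prop) :
    (∀ j, j < C.lam → P (pvOrbit arr s (T + j))) ↔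
      (∀ i, i < C.lam → P (pvOrbit arr s (C.mu + i))) := by
  have hlam := C.lam_pos
  obtain ⟨d, rfl⟩ := Nat.exists_eq_add_of_le hT
  have horb : ∀ x : Nat, pvOrbit arr s (C.mu + x) = pvOrbit arr s (C.mu + x % C.lam) := by
    intro x
    have h1 := pvOrbit_mod arr s C (C.mu + x) (by omega)
    have e : C.mu + x - C.mu = x := by omega
    rw [e] at h1
    exact h1
  have hsur : ∀ i, i < C.lam → ∃ j, j < C.lam ∧ (d + j) % C.lam = i := by
    intro i hi
    have hdm := Nat.div_add_mod d C.lam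
    have hmlt : d % C.lam < C.lam := Nat.mod_lt _ (by omega)
    by_cases hmi : d % C.lam ≤ i
    · refine ⟨i - d % C.lam, by omega, ?_⟩
      have e : d + (i - d % C.lam) = C.lam * (d / C.lam) + i := by omega
      rw [e, Nat.mul_add_mod, Nat.mod_eq_of_lt hi]
    · refine ⟨i + C.lam - d % C.lam, by omega, ?_⟩
      have e2 : C.lam * (d / C.lam + 1) = C.lam * (d / C.lam) + C.lam := by ring
      have e : d + (i + C.lam - d % C.lam) = C.lam * (d / C.lam + 1) + i := by omega
      rw [e, Nat.mul_add_mod, Nat.mod_eq_of_lt hi]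
  constructor
  · intro hall i hi
    obtain ⟨j, hj, hji⟩ := hsur i hi
    have h1 := hall j hj
    have e : C.mu + d + j = C.mu + (d + j) := by ring
    rw [e, horb (d + j), hji] at h1
    exact h1
  · intro hall j hj
    have e : C.mu + d + j = C.mu + (d + j) := by ring
    rw [e, horb (d + j)]
    exact hall _ (Nat.mod_lt _ (by omega))

theorem pvAllDecide (l : List Int) (p : Int → Prop) [DecidablePred p] :
    (l.all fun x => decide (p x)) = decide (∀ x ∈ l, p x) := by
  by_cases h : ∀ x ∈ l, p x
  · rw [decide_eq_true h]
    rw [List.all_eq_true]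
    intro x hx
    exact decide_eq_true (h x hx)
  · rw [decide_eq_false h]
    rw [Bool.eq_false_iff]
    intro hall
    rw [List.all_eq_true] at hall
    exact h (fun x hx => of_decide_eq_true (hall x hx))

theorem pvA_eval (arr : List Int) (s : Int) (C : PvCycleData arr s) (T : Nat)
    (hT1 : 1 ≤ T) (hTn : T ≤ arr.length + 1)
    (hTeq : pvOrbit arr s T = pvOrbit arr s (2 * T))
    (hmin : ∀ j, 1 ≤ j → j < T → pvOrbit arr s j ≠ pvOrbit arr s (2 * j))
    (hTmu : C.mu ≤ T) :
    has_cycle_from_start arr s = (decide (2 ≤ C.lam) &&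
      decide (∀ j, j < C.lam → 1 ≤ j →
        (decide (0 < (PySem.List.pyGet? arr (pvOrbit arr s (T + j))).getD 0)
          = decide (0 ≤ (PySem.List.pyGet? arr (pvOrbit arr s T)).getD 0)))) := by
  have hfl := pvFloyd_run arr s T hTeq hmin (2 * arr.length + 2) 0 (by omega) (by omega)
  rw [show (2 : Nat) * 0 = 0 from rfl] at hfl
  rw [show pvOrbit arr s 0 = s from rfl] at hfl
  unfold has_cycle_from_start
  rw [hfl]
  show pvScan arr (pvOrbit arr s T)
      (decide (0 ≤ (PySem.List.pyGet? arr (pvOrbit arr s T)).getD 0))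
      (arr.length + 1) (pvGetNext arr (pvOrbit arr s T)) 1 = _
  rw [show pvGetNext arr (pvOrbit arr s T) = pvOrbit arr s (T + 1) from rfl]
  exact pvScan_run arr s C T hTmu _ (arr.length + 1) 1 le_rfl C.lam_pos
    (by have := C.bound; omega)

theorem pvB_eval (arr : List Int) (s : Int) (C : PvCycleData arr s) :
    has_cycle_from_start_alt arr s =
      (if ((List.range C.lam).map (fun i => pvOrbit arr s (C.mu + i))).length < 2 then false
       else ((List.range C.lam).map (fun i => pvOrbit arr s (C.mu + i))).all
            (fun j => decide (0 < (PySem.List.pyGet? arr j).getD 0))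
         || ((List.range C.lam).map (fun i => pvOrbit arr s (C.mu + i))).all
            (fun j => decide ((PySem.List.pyGet? arr j).getD 0 < 0))) := by
  have hwalk := pvWalk_run arr s C (arr.length + 2) 0 (by omega) (by have := C.bound; omega)
  rw [show pvSeenUpTo arr s 0 = PySem.Dict.empty from rfl,
      show pvPathUpTo arr s 0 = ([] : List Int) from rfl,
      show pvOrbit arr s 0 = s from rfl,
      show ((0 : Nat) : Int) = 0 from rfl] at hwalk
  unfold has_cycle_from_start_alt
  rw [hwalk]
  have hget : ((pvSeenUpTo arr s (C.mu + C.lam)).get? (pvOrbit arr s (C.mu + C.lam))).getD 0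
      = ((C.mu : Nat) : Int) := by
    rw [C.per C.mu le_rfl]
    rw [pvSeen_get_some arr s C (C.mu + C.lam) C.mu (by have := C.lam_pos; omega) le_rfl]
    rfl
  show (if (PySem.List.slice (pvPathUpTo arr s (C.mu + C.lam)) (some (((pvSeenUpTo arr s (C.mu + C.lam)).get? (pvOrbit arr s (C.mu + C.lam))).getD 0)) none).length < 2 then false else (PySem.List.slice (pvPathUpTo arr s (C.mu + C.lam)) (some (((pvSeenUpTo arr s (C.mu + C.lam)).get? (pvOrbit arr s (C.mu + C.lam))).getD 0)) none).all (fun j => decide (0 < (PySem.List.pyGet? arr j).getD 0)) || (PySem.List.slice (pvPathUpTo arr s (C.mu + C.lam)) (some (((pvSeenUpTo arr s (C.mu + C.lam)).get? (pvOrbit arr s (C.mu + C.lam))).getD 0)) none).all (fun j => decide ((PySem.List.pyGet? arr j).getD 0 < 0))) = _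
  rw [hget]
  have hcyc : PySem.List.slice (pvPathUpTo arr s (C.mu + C.lam)) (some ((C.mu : Nat) : Int)) none
      = (List.range C.lam).map (fun i => pvOrbit arr s (C.mu + i)) := by
    rw [PySem.List.slice_from_natCast]
    unfold pvPathUpTo
    rw [List.range_add, List.map_append, List.drop_left' (by simp), List.map_map]
    rfl
  rw [hcyc]

-- ===== VERDICT (by name: the statement is the Claim_ definition above) =====
theorem has_cycle_from_start_spec : Claim_equal_has_cycle_from_start := by
  intro arr start _ hpre
  obtain ⟨hne, -⟩ := hpre
  unfold Spec_has_cycle_from_start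
  have hn : 0 < arr.length := List.length_pos_of_ne_nil hne
  obtain ⟨C⟩ := pvMaster arr start hne
  obtain ⟨t0, ht01, ht0n, ht0eq⟩ := pvFloyd_exists arr start C
  have hexT : ∃ t, 1 ≤ t ∧ pvOrbit arr start t = pvOrbit arr start (2 * t) := ⟨t0, ht01, ht0eq⟩
  obtain ⟨hT1, hTeq⟩ := Nat.find_spec hexT
  have hmin : ∀ j, 1 ≤ j → j < Nat.find hexT →
      pvOrbit arr start j ≠ pvOrbit arr start (2 * j) :=
    fun j hj1 hj2 hje => Nat.find_min hexT hj2 ⟨hj1, hje⟩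
  have hTmu : C.mu ≤ Nat.find hexT := by
    apply C.entry _ _ hT1
    have e : Nat.find hexT + Nat.find hexT = 2 * Nat.find hexT := by ring
    rw [e]; exact hTeq.symm
  have hTn : Nat.find hexT ≤ arr.length + 1 :=
    le_trans (Nat.find_min' hexT ⟨ht01, ht0eq⟩) ht0n
  rw [pvA_eval arr start C (Nat.find hexT) hT1 hTn hTeq hmin hTmu, pvB_eval arr start C]
  have hlen : ((List.range C.lam).map (fun i => pvOrbit arr start (C.mu + i))).length = C.lam := by
    simp
  rw [hlen]
  rw [pvAllDecide _ (fun v => 0 < (PySem.List.pyGet? arr v).getD 0),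
      pvAllDecide _ (fun v => (PySem.List.pyGet? arr v).getD 0 < 0)]
  rcases Nat.lt_or_ge C.lam 2 with hl2 | hl2
  · rw [if_pos hl2, decide_eq_false (by omega : ¬ 2 ≤ C.lam), Bool.false_and]
  · rw [if_neg (by omega), decide_eq_true hl2, Bool.true_and]
    have hnz := pvCycleNonzero arr start hne C hl2
    have hTz : (PySem.List.pyGet? arr (pvOrbit arr start (Nat.find hexT))).getD 0 ≠ 0 :=
      hnz (Nat.find hexT) hTmu
    have hrT := pvOrbit_mod arr start C (Nat.find hexT) hTmu
    have hr0 : (Nat.find hexT - C.mu) % C.lam < C.lam :=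
      Nat.mod_lt _ (by have := C.lam_pos; omega)
    have hallpos := pvCycleAll arr start C (Nat.find hexT) hTmu
      (fun v => 0 < (PySem.List.pyGet? arr v).getD 0)
    have hallneg := pvCycleAll arr start C (Nat.find hexT) hTmu
      (fun v => (PySem.List.pyGet? arr v).getD 0 < 0)
    have hmempos : decide (∀ x ∈ (List.range C.lam).map (fun i => pvOrbit arr start (C.mu + i)),
        0 < (PySem.List.pyGet? arr x).getD 0)
        = decide (∀ i, i < C.lam → 0 < (PySem.List.pyGet? arr (pvOrbit arr start (C.mu + i))).getD 0) := by
      apply decide_eq_decide.mpr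
      simp [List.mem_map, List.mem_range]
    have hmemneg : decide (∀ x ∈ (List.range C.lam).map (fun i => pvOrbit arr start (C.mu + i)),
        (PySem.List.pyGet? arr x).getD 0 < 0)
        = decide (∀ i, i < C.lam → (PySem.List.pyGet? arr (pvOrbit arr start (C.mu + i))).getD 0 < 0) := by
      apply decide_eq_decide.mpr
      simp [List.mem_map, List.mem_range]
    rw [hmempos, hmemneg]
    rcases lt_trichotomy ((PySem.List.pyGet? arr (pvOrbit arr start (Nat.find hexT))).getD 0) 0
      with hneg | h0 | hpos
    · -- reference value negative: result is "all cycle values negative"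
      rw [decide_eq_false (not_le.mpr hneg)]
      by_cases han : ∀ i, i < C.lam →
          (PySem.List.pyGet? arr (pvOrbit arr start (C.mu + i))).getD 0 < 0
      · rw [decide_eq_true han, Bool.or_true]
        apply decide_eq_true
        intro j hj hj1
        apply decide_eq_false
        have := hallneg.mpr han j hj
        omega
      · rw [decide_eq_false han]
        have hp1 : ¬ ∀ i, i < C.lam →
            0 < (PySem.List.pyGet? arr (pvOrbit arr start (C.mu + i))).getD 0 := by
          intro hp
          have := hp _ hr0
          rw [← hrT] at this
          omega
        rw [decide_eq_false hp1, Bool.or_false]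
        apply decide_eq_false
        intro hA
        apply han
        apply hallneg.mp
        intro j hj
        rcases Nat.eq_zero_or_pos j with hj0 | hj1
        · subst hj0; exact hneg
        · have hz := hnz (Nat.find hexT + j) (by omega)
          have := of_decide_eq_false (hA j hj hj1)
          omega
    · exact absurd h0 hTz
    · -- reference value positive: result is "all cycle values positive"
      rw [decide_eq_true (le_of_lt hpos)]
      by_cases hap : ∀ i, i < C.lam →
          0 < (PySem.List.pyGet? arr (pvOrbit arr start (C.mu + i))).getD 0
      · rw [decide_eq_true hap, Bool.true_or]
        apply decide_eq_true
        intro j hj hj1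
        exact decide_eq_true (hallpos.mpr hap j hj)
      · rw [decide_eq_false hap]
        have hn1 : ¬ ∀ i, i < C.lam →
            (PySem.List.pyGet? arr (pvOrbit arr start (C.mu + i))).getD 0 < 0 := by
          intro hp
          have := hp _ hr0
          rw [← hrT] at this
          omega
        rw [decide_eq_false hn1, Bool.false_or]
        apply decide_eq_false
        intro hA
        apply hap
        apply hallpos.mp
        intro j hj
        rcases Nat.eq_zero_or_pos j with hj0 | hj1
        · subst hj0; exact hpos
        · exact of_decide_eq_true (hA j hj hj1)
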